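-- pv_equiv track=rewrite | github.com/czarrodina/example | TMA_auto_registration_v2.py | he_imc_files
-- ===== SOURCE A (Python) =====
-- def he_imc_files(filelist):
--     num = 0
--     flist = []
--     for file in filelist:
--         if len(file) > 0:
--             flist.append(file[0])
--         elif num ==3:
--             flist.append('')
--         else:
--             return []
--         num +=1
--     return flist
-- ===== SOURCE B (Python) =====
-- def he_imc_files(filelist):
--     # Slice decomposition: index 3 is the only position allowed to be empty,
--     # so split the list into [:3], [3:4], [4:] and treat each part uniformly.
--     pre, mid, post = filelist[:3], filelist[3:4], filelist[4:]
--     if any(not f for f in pre) or any(not f for f in post):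
--         return []
--     return [f[0] for f in pre] + ['' if not f else f[0] for f in mid] + [f[0] for f in post]
-- ===== Notes on version B (the rewrite author's own statement) =====
-- stated objective: alternative
-- what changed: Replaces the counter-driven loop with interleaved append/early-return by a slice decomposition: the list is split into filelist[:3], filelist[3:4] and filelist[4:], the two side slices are validated for empties (no per-element index bookkeeping at all), and the result is the concatenation of three independent head-extraction comprehensions.
import Mathlib
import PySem

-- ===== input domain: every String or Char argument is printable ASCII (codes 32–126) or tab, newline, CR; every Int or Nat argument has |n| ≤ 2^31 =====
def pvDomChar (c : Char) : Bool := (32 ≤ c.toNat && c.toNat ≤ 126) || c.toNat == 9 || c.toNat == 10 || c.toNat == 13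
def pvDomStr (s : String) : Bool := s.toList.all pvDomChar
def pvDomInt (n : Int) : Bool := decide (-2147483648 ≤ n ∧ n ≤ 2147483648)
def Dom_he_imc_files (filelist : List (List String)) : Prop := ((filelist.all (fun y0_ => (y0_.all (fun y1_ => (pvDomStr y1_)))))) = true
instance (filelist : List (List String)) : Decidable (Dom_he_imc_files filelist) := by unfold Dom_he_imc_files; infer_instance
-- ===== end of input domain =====

-- ===== PORT A =====
-- B replaces A's counter-driven loop (interleaved append / early return) by a slice
-- decomposition [:3] / [3:4] / [4:] with three independent head-extraction maps
-- (alternative structure, same cost); return values proved equal on all inputs.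
-- Loop of A: counter num, accumulator flist, early return [] on an empty entry off index 3.
def heLoopA : List (List String) → Int → List String → List String
  | [], _, flist => flist
  | f :: rest, num, flist =>
    if f.length > 0 then heLoopA rest (num + 1) (flist ++ [f.headD ""])
    else if num == 3 then heLoopA rest (num + 1) (flist ++ [""])
    else []

def he_imc_files (filelist : List (List String)) : List String :=
  heLoopA filelist 0 []

-- ===== PORT B =====
def he_imc_files_alt (filelist : List (List String)) : List String :=
  let pre := PySem.List.slice filelist none (some 3)
  let mid := PySem.List.slice filelist (some 3) (some 4)
  let post := PySem.List.slice filelist (some 4) none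
  if pre.any (·.isEmpty) || post.any (·.isEmpty) then []
  else pre.map (fun f => f.headD "")
       ++ mid.map (fun f => if f.isEmpty then "" else f.headD "")
       ++ post.map (fun f => f.headD "")

-- ===== PRECONDITION & SPEC =====
def Spec_he_imc_files (filelist : List (List String)) (out : List String) : Prop := out = he_imc_files_alt filelist
instance (filelist : List (List String)) (out : List String) : Decidable (Spec_he_imc_files filelist out) := by unfold Spec_he_imc_files; infer_instance

-- ===== CLAIM (what is proved, stated in full; the proofs are below) =====
def Claim_equal_he_imc_files : Prop := ∀ (filelist : List (List String)), Dom_he_imc_files filelist → Spec_he_imc_files filelist (he_imc_files filelist)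

-- ===== LEMMAS AND PROOFS =====
-- Characterisation of A's loop via enumerate: [] iff an empty entry sits at a global
-- index ≠ 3, else the accumulated heads.
lemma heLoopA_eq (fs : List (List String)) (num : Int) (acc : List String) :
    heLoopA fs num acc =
      if (PySem.List.enumerate fs num).any (fun p => p.2.isEmpty && p.1 != 3) then []
      else acc ++ fs.map (fun f => f.headD "") := by
  induction fs generalizing num acc with
  | nil => simp [heLoopA, PySem.List.enumerate_nil]
  | cons f rest ih =>
    rw [PySem.List.enumerate_cons]
    by_cases hf : f.length > 0
    · have hne : f.isEmpty = false := by
        cases f with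
        | nil => simp at hf
        | cons a as => simp
      simp only [heLoopA, if_pos hf, ih, List.any_cons, hne, Bool.false_and, Bool.false_or,
        List.map_cons]
      split <;> simp
    · have he : f.isEmpty = true := by
        cases f with
        | nil => simp
        | cons a as => simp at hf
      have hfz : f = [] := List.isEmpty_iff.mp he
      by_cases h3 : num = 3
      · subst h3
        subst hfz
        simp only [heLoopA, ih, List.any_cons, List.isEmpty_nil, bne_self_eq_false,
          Bool.true_and, Bool.false_or]
        norm_num
      · have : (num == 3) = false := by simp [h3]
        simp [heLoopA, if_neg hf, this, List.any_cons, he, h3]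

-- past index 3, the index filter in the enumerate condition is vacuous
lemma enum_any_ge4 (rest : List (List String)) (n : Int) (hn : 4 ≤ n) :
    (PySem.List.enumerate rest n).any (fun p => p.2.isEmpty && p.1 != 3)
      = rest.any (fun f => f.isEmpty) := by
  induction rest generalizing n with
  | nil => simp [PySem.List.enumerate_nil]
  | cons f rest ih =>
    rw [PySem.List.enumerate_cons]
    have h3 : (n != 3) = true := by simp; omega
    simp only [List.any_cons, h3, Bool.and_true, ih (n + 1) (by omega)]

-- the enumerate condition equals B's two side-slice checks
lemma enum_any_eq_slices (fl : List (List String)) :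
    (PySem.List.enumerate fl 0).any (fun p => p.2.isEmpty && p.1 != 3)
      = ((fl.take 3).any (fun f => f.isEmpty) || (fl.drop 4).any (fun f => f.isEmpty)) := by
  match fl with
  | [] => simp [PySem.List.enumerate_nil]
  | [a] => simp [PySem.List.enumerate_cons, PySem.List.enumerate_nil]
  | [a, b] => simp [PySem.List.enumerate_cons, PySem.List.enumerate_nil]
  | [a, b, c] => simp [PySem.List.enumerate_cons, PySem.List.enumerate_nil]
  | a :: b :: c :: d :: rest =>
    have h := enum_any_ge4 rest 4 (by norm_num)
    simp only [PySem.List.enumerate_cons, List.any_cons, List.take, List.drop]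
    norm_num [h]
    cases a.isEmpty <;> cases b.isEmpty <;> cases c.isEmpty <;> cases d.isEmpty <;> simp

-- the three head-extraction maps rebuild the full map
lemma maps_rebuild (fl : List (List String)) :
    (fl.take 3).map (fun f => f.headD "")
      ++ ((fl.drop 3).take 1).map (fun f => if f.isEmpty then "" else f.headD "")
      ++ (fl.drop 4).map (fun f => f.headD "")
      = fl.map (fun f => f.headD "") := by
  have hmid : ((fl.drop 3).take 1).map (fun f => if f.isEmpty then "" else f.headD "")
      = ((fl.drop 3).take 1).map (fun f => f.headD "") := by
    apply List.map_congr_left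
    intro f _
    cases f <;> simp
  rw [hmid, ← List.map_append, ← List.map_append]
  congr 1
  rw [List.append_assoc]
  have : fl.drop 4 = (fl.drop 3).drop 1 := by
    rw [List.drop_drop]
  rw [this, List.take_append_drop, List.take_append_drop]

-- ===== VERDICT (by name: the statement is the Claim_ definition above) =====
theorem he_imc_files_spec : Claim_equal_he_imc_files := by
  intro filelist _
  unfold Spec_he_imc_files he_imc_files he_imc_files_alt
  rw [heLoopA_eq, enum_any_eq_slices]
  have h3 : PySem.List.slice filelist none (some 3) = filelist.take 3 := by
    simpa using PySem.List.slice_to_natCast filelist 3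
  have h34 : PySem.List.slice filelist (some 3) (some 4) = (filelist.drop 3).take 1 := by
    simpa using PySem.List.slice_natCast filelist 3 4
  have h4 : PySem.List.slice filelist (some 4) none = filelist.drop 4 := by
    simpa using PySem.List.slice_from_natCast filelist 4
  simp only [h3, h34, h4]
  split
  · rfl
  · simpa using (maps_rebuild filelist).symm
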